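-- pv_equiv track=rewrite | github.com/Amber-Agarwal/Mind-Games-Monte-Carlo-Sim | ques_1.py | calc_variance
-- ===== SOURCE A (Python) =====
-- M=1000000007
--
-- def mod_add(a, b):
--     a=(a%M+M)%M
--     b=(b%M+M)%M
--     return (a+b)%M
--
-- def mod_multiply(a, b):
--     a=(a%M+M)%M
--     b=(b%M+M)%M
--     return (a*b)%M
--
-- def mod_divide(a, b):
--     a=(a%M+M)%M
--     b=(b%M+M)%M
--     return mod_multiply(a, pow(b, M-2, M))
--
-- def calc_prob(alice_wins, bob_wins):
--     dp = [[0 for _ in range(bob_wins + 1)] for _ in range(alice_wins + 1)]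
--
--     # Base Case
--     dp[1][1] = 1
--
--     for a in range(1, alice_wins + 1):
--         for b in range(1, bob_wins + 1):
--             if a == 1 and b == 1:
--                 continue
--             if a > 1:
--                 dp[a][b] = mod_add(dp[a][b], mod_multiply(dp[a-1][b], mod_divide(b, a + b - 1))) # when alice wins in the current game and has already won a-1 games in the past
--             if b > 1:
--                 dp[a][b] = mod_add(dp[a][b], mod_multiply(dp[a][b-1], mod_divide(a, a + b - 1))) # when alice loses the current game and has already won a games in the past
--
--     return dp[alice_wins][bob_wins]
--
-- def calc_expectation(t):
--     """
--     Returns: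
--         The expected value of \sum_{i=1}^{t} Xi will be of the form p/q,
--         where p and q are positive integers,
--         return p.q^(-1) mod 1000000007.
--
--     """
--     ans = 0
--     for i in range(-t+2,t-1):
--         if (t+i)%2 == 0:
--             ans=mod_add(ans,mod_multiply(i,calc_prob((t+i)//2,(t-i)//2))) # when the total points over n games are i
--
--     return ans
--
-- def calc_variance(t):
--     """
--     Returns:
--         The variance of \sum_{i=1}^{t} Xi will be of the form p/q,
--         where p and q are positive integers,
--         return p.q^(-1) mod 1000000007.
--
--     """
--     ans = 0
--     for i in range(-t+2,t-1):
--         if (t+i)%2 == 0: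
--             ans=mod_add(ans,mod_multiply(mod_multiply(i,i),calc_prob((t+i)//2,(t-i)//2)))
--     y=calc_expectation(t)
--     expectation_squared = mod_multiply(y,y)
--     return ans-expectation_squared
-- ===== SOURCE B (Python) =====
-- M = 1000000007
--
-- def calc_variance(t):
--     # One shared dp table computed once and reused for every probability
--     # lookup, instead of rebuilding a fresh table inside each calc_prob call.
--     if t < 2:
--         return 0
--     n = t - 1
--     dp = [[0] * (n + 1) for _ in range(n + 1)]
--     dp[1][1] = 1
--     for a in range(1, n + 1):
--         for b in range(1, n + 1):
--             if a == 1 and b == 1: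
--                 continue
--             v = 0
--             if a > 1:
--                 v = (v + dp[a - 1][b] * b % M * pow(a + b - 1, M - 2, M)) % M
--             if b > 1:
--                 v = (v + dp[a][b - 1] * a % M * pow(a + b - 1, M - 2, M)) % M
--             dp[a][b] = v
--     ans = 0
--     exp = 0
--     for i in range(-t + 2, t - 1):
--         if (t + i) % 2 == 0:
--             p = dp[(t + i) // 2][(t - i) // 2]
--             ans = (ans + i * i * p) % M
--             exp = (exp + i * p) % M
--     return ans - exp * exp % M
-- ===== Notes on version B (the rewrite author's own statement) =====
-- stated objective: faster
-- what changed: B computes one shared dp table of probabilities once and reads the diagonal a+b=t from it while accumulating the second moment and the expectation in a single pass, instead of A rebuilding a fresh O(t^2) dp table inside calc_prob for every term of two separate loops.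
import Mathlib
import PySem

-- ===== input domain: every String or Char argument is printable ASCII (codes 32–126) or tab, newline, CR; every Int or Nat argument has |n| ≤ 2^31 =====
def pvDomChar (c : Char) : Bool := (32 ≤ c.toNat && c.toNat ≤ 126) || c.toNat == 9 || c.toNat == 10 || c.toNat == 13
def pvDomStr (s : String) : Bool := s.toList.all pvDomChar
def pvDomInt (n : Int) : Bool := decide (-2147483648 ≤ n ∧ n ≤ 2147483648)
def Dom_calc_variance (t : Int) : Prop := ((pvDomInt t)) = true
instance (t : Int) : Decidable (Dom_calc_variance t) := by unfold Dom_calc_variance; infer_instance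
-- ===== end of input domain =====

-- ===== PORT A =====
def M : Int := 1000000007

def mod_add (a b : Int) : Int :=
  let a := (a % M + M) % M
  let b := (b % M + M) % M
  (a + b) % M

def mod_multiply (a b : Int) : Int :=
  let a := (a % M + M) % M
  let b := (b % M + M) % M
  (a * b) % M

-- pow(b, e, m): Python's three-argument pow, ported by hand as the binary
-- (square-and-multiply) exponentiation CPython performs; exact for m > 0,
-- the only way it is used here (m = M).
def powmod (b : Int) (e : Nat) (m : Int) : Int :=
  if e = 0 then 1 % m
  else
    let h := powmod b (e / 2) m
    let h2 := h * h % m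
    if e % 2 = 1 then h2 * b % m else h2
termination_by e
decreasing_by omega

def mod_divide (a b : Int) : Int :=
  let a := (a % M + M) % M
  let b := (b % M + M) % M
  mod_multiply a (powmod b (M - 2).toNat M)     -- pow(b, M-2, M)

-- dp, a Python list of lists read and written only at in-range nonnegative
-- indices (initial entries all 0), is ported as a finite map (row, col) ↦ value
-- with default 0; dp[a][b] = v becomes an insert at key (a, b).
def calc_prob (alice_wins bob_wins : Int) : Int :=
  let dp : PySem.Dict (Int × Int) Int := PySem.Dict.empty
  -- Base Case
  let dp := dp.insert (1, 1) 1
  let dp := (PySem.List.pyRange 1 (alice_wins + 1) 1).foldl (fun dp a =>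
    (PySem.List.pyRange 1 (bob_wins + 1) 1).foldl (fun dp b =>
      if a = 1 ∧ b = 1 then dp
      else
        let dp := if 1 < a then
            dp.insert (a, b)
              (mod_add (dp.getD (a, b) 0)
                (mod_multiply (dp.getD (a - 1, b) 0) (mod_divide b (a + b - 1))))
          else dp
        let dp := if 1 < b then
            dp.insert (a, b)
              (mod_add (dp.getD (a, b) 0)
                (mod_multiply (dp.getD (a, b - 1) 0) (mod_divide a (a + b - 1))))
          else dp
        dp) dp) dp
  dp.getD (alice_wins, bob_wins) 0

def calc_expectation (t : Int) : Int :=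
  (PySem.List.pyRange (-t + 2) (t - 1) 1).foldl (fun ans i =>
    if (t + i) % 2 = 0 then
      mod_add ans (mod_multiply i
        (calc_prob (PySem.Int.floordiv (t + i) 2) (PySem.Int.floordiv (t - i) 2)))
    else ans) 0

def calc_variance (t : Int) : Int :=
  let ans := (PySem.List.pyRange (-t + 2) (t - 1) 1).foldl (fun ans i =>
    if (t + i) % 2 = 0 then
      mod_add ans (mod_multiply (mod_multiply i i)
        (calc_prob (PySem.Int.floordiv (t + i) 2) (PySem.Int.floordiv (t - i) 2)))
    else ans) 0
  let y := calc_expectation t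
  let expectation_squared := mod_multiply y y
  ans - expectation_squared

-- ===== PORT B =====
-- B: one shared dp table, filled once; both moments accumulated in a single pass.
def calc_variance_alt (t : Int) : Int :=
  if t < 2 then 0
  else
    let n := t - 1
    let dp : PySem.Dict (Int × Int) Int := PySem.Dict.empty
    let dp := dp.insert (1, 1) 1
    let dp := (PySem.List.pyRange 1 (n + 1) 1).foldl (fun dp a =>
      (PySem.List.pyRange 1 (n + 1) 1).foldl (fun dp b =>
        if a = 1 ∧ b = 1 then dp
        else
          let v : Int := 0
          let v := if 1 < a then
              (v + dp.getD (a - 1, b) 0 * b % M * powmod (a + b - 1) (M - 2).toNat M) % M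
            else v
          let v := if 1 < b then
              (v + dp.getD (a, b - 1) 0 * a % M * powmod (a + b - 1) (M - 2).toNat M) % M
            else v
          dp.insert (a, b) v) dp) dp
    let s := (PySem.List.pyRange (-t + 2) (t - 1) 1).foldl (fun s i =>
      if (t + i) % 2 = 0 then
        let p := dp.getD (PySem.Int.floordiv (t + i) 2, PySem.Int.floordiv (t - i) 2) 0
        ((s.1 + i * i * p) % M, (s.2 + i * p) % M)
      else s) (0, 0)
    s.1 - s.2 * s.2 % M

-- ===== PRECONDITION & SPEC =====
def Spec_calc_variance (t : Int) (out : Int) : Prop := out = calc_variance_alt t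
instance (t : Int) (out : Int) : Decidable (Spec_calc_variance t out) := by unfold Spec_calc_variance; infer_instance

-- ===== CLAIM (what is proved, stated in full; the proofs are below) =====
def Claim_equal_calc_variance : Prop := ∀ (t : Int), Dom_calc_variance t → Spec_calc_variance t (calc_variance t)

-- ===== LEMMAS AND PROOFS =====
-- The common recurrence both dp tables compute: pf a b is the table value at
-- cell (a, b) (a, b ≥ 1, row-major fill order), 0 outside.
def pf (a b : Int) : Int :=
  if h : 1 ≤ a ∧ 1 ≤ b then
    if a = 1 ∧ b = 1 then 1
    else
      let v1 := if 1 < a then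
          mod_add 0 (mod_multiply (pf (a - 1) b) (mod_divide b (a + b - 1)))
        else 0
      if 1 < b then mod_add v1 (mod_multiply (pf a (b - 1)) (mod_divide a (a + b - 1)))
      else v1
  else 0
termination_by (a + b).toNat
decreasing_by all_goals omega

theorem pf_base : pf 1 1 = 1 := by rw [pf]; norm_num

-- A dp table correct on region R (and 0 outside).
def Tbl (R : Int → Int → Prop) (dp : PySem.Dict (Int × Int) Int) : Prop :=
  ∀ x y, (1 ≤ x ∧ 1 ≤ y ∧ R x y → dp.getD (x, y) 0 = pf x y) ∧
    (¬(1 ≤ x ∧ 1 ≤ y ∧ R x y) → dp.getD (x, y) 0 = 0)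

theorem Tbl_congr {R S : Int → Int → Prop} {dp : PySem.Dict (Int × Int) Int}
    (h : ∀ x y, 1 ≤ x → 1 ≤ y → (R x y ↔ S x y)) (hd : Tbl R dp) : Tbl S dp := by
  intro x y
  refine ⟨fun ⟨hx, hy, hs⟩ => (hd x y).1 ⟨hx, hy, (h x y hx hy).2 hs⟩, fun hn => (hd x y).2 ?_⟩
  intro ⟨hx, hy, hr⟩
  exact hn ⟨hx, hy, (h x y hx hy).1 hr⟩

-- the region processed just before cell (a, b) of row a, table width bw
def Reg (bw a c : Int) (x y : Int) : Prop :=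
  (x < a ∧ y ≤ bw) ∨ (x = a ∧ y < c) ∨ (x = 1 ∧ y = 1)

-- generic inner loop: one row of the fill, for any step function whose writes
-- are confined to the current cell and correct there
theorem inner_general
    (step : PySem.Dict (Int × Int) Int → Int → Int → PySem.Dict (Int × Int) Int)
    (h1 : ∀ dp a b x y, ¬(x = a ∧ y = b) → (step dp a b).getD (x, y) 0 = dp.getD (x, y) 0)
    (h2 : ∀ (bw : Int) dp a b, 1 ≤ a → 1 ≤ b → b ≤ bw → Tbl (Reg bw a b) dp →
      (step dp a b).getD (a, b) 0 = pf a b)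
    (bw a : Int) (ha : 1 ≤ a) :
    ∀ (c : Int) (dp : PySem.Dict (Int × Int) Int), 1 ≤ c → c ≤ bw + 1 → Tbl (Reg bw a c) dp →
      Tbl (Reg bw a (bw + 1)) ((PySem.List.pyRange c (bw + 1) 1).foldl (fun dp b => step dp a b) dp) := by
  intro c
  by_cases hterm : bw + 1 ≤ c
  · intro dp hc hc2 hdp
    rw [PySem.List.pyRange_one_eq_nil hterm]
    simp only [List.foldl_nil]
    refine Tbl_congr (fun x y hx hy => ?_) hdp
    unfold Reg
    omega
  · have hlt : c < bw + 1 := by omega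
    intro dp hc hc2 hdp
    rw [PySem.List.pyRange_one_cons hlt]
    simp only [List.foldl_cons]
    have hstep : Tbl (Reg bw a (c + 1)) (step dp a c) := by
      intro x y
      constructor
      · rintro ⟨hx, hy, hr⟩
        by_cases hxy : x = a ∧ y = c
        · obtain ⟨rfl, rfl⟩ := hxy
          exact h2 bw dp x y ha hc (by omega) hdp
        · rw [h1 dp a c x y hxy]
          refine (hdp x y).1 ⟨hx, hy, ?_⟩
          unfold Reg at hr ⊢
          omega
      · intro hn
        have hxy : ¬(x = a ∧ y = c) := by
          intro ⟨rfl, rfl⟩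
          exact hn ⟨ha, hc, Or.inr (Or.inl ⟨rfl, by omega⟩)⟩
        rw [h1 dp a c x y hxy]
        refine (hdp x y).2 ?_
        intro ⟨hx, hy, hr⟩
        refine hn ⟨hx, hy, ?_⟩
        rcases hr with h | h | h
        · exact Or.inl h
        · exact Or.inr (Or.inl ⟨h.1, by omega⟩)
        · exact Or.inr (Or.inr h)
    exact inner_general step h1 h2 bw a ha (c + 1) (step dp a c) (by omega) (by omega) hstep
termination_by c => (bw + 1 - c).toNat
decreasing_by omega

theorem outer_general
    (step : PySem.Dict (Int × Int) Int → Int → Int → PySem.Dict (Int × Int) Int)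
    (h1 : ∀ dp a b x y, ¬(x = a ∧ y = b) → (step dp a b).getD (x, y) 0 = dp.getD (x, y) 0)
    (h2 : ∀ (bw : Int) dp a b, 1 ≤ a → 1 ≤ b → b ≤ bw → Tbl (Reg bw a b) dp →
      (step dp a b).getD (a, b) 0 = pf a b)
    (bw aw : Int) (hbw : 0 ≤ bw) :
    ∀ (r : Int) (dp : PySem.Dict (Int × Int) Int), 1 ≤ r → r ≤ aw + 1 → Tbl (Reg bw r 1) dp →
      Tbl (Reg bw (aw + 1) 1)
        ((PySem.List.pyRange r (aw + 1) 1).foldl (fun dp a =>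
          (PySem.List.pyRange 1 (bw + 1) 1).foldl (fun dp b => step dp a b) dp) dp) := by
  intro r
  by_cases hterm : aw + 1 ≤ r
  · intro dp hr hr2 hdp
    rw [PySem.List.pyRange_one_eq_nil hterm]
    simp only [List.foldl_nil]
    have : r = aw + 1 := by omega
    subst this
    exact hdp
  · have hlt : r < aw + 1 := by omega
    intro dp hr hr2 hdp
    rw [PySem.List.pyRange_one_cons hlt]
    simp only [List.foldl_cons]
    have hrow := inner_general step h1 h2 bw r hr 1 dp (by omega) (by omega) hdp
    have hrow' : Tbl (Reg bw (r + 1) 1)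
        ((PySem.List.pyRange 1 (bw + 1) 1).foldl (fun dp b => step dp r b) dp) := by
      refine Tbl_congr (fun x y hx hy => ?_) hrow
      unfold Reg
      constructor
      · rintro (h | h | h)
        · exact Or.inl ⟨by omega, h.2⟩
        · exact Or.inl ⟨by omega, by omega⟩
        · exact Or.inr (Or.inr h)
      · rintro (h | h | h)
        · rcases (by omega : x < r ∨ x = r) with hx' | hx'
          · exact Or.inl ⟨hx', h.2⟩
          · exact Or.inr (Or.inl ⟨hx', by omega⟩)
        · omega
        · exact Or.inr (Or.inr h)
    exact outer_general step h1 h2 bw aw hbw (r + 1) _ (by omega) (by omega) hrow'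
termination_by r => (aw + 1 - r).toNat
decreasing_by omega

def stepA (dp : PySem.Dict (Int × Int) Int) (a b : Int) : PySem.Dict (Int × Int) Int :=
  if a = 1 ∧ b = 1 then dp
  else
    let dp := if 1 < a then
        dp.insert (a, b)
          (mod_add (dp.getD (a, b) 0)
            (mod_multiply (dp.getD (a - 1, b) 0) (mod_divide b (a + b - 1))))
      else dp
    let dp := if 1 < b then
        dp.insert (a, b)
          (mod_add (dp.getD (a, b) 0)
            (mod_multiply (dp.getD (a, b - 1) 0) (mod_divide a (a + b - 1))))
      else dp
    dp

theorem stepA_frame : ∀ dp a b x y, ¬(x = a ∧ y = b) →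
    (stepA dp a b).getD (x, y) 0 = dp.getD (x, y) 0 := by
  intro dp a b x y hxy
  have hne : ((x, y) : Int × Int) ≠ (a, b) := by simp [Prod.ext_iff]; omega
  unfold stepA
  split_ifs <;> simp_all [PySem.Dict.getD_insert]

theorem stepA_correct : ∀ (bw : Int) dp a b, 1 ≤ a → 1 ≤ b → b ≤ bw → Tbl (Reg bw a b) dp →
    (stepA dp a b).getD (a, b) 0 = pf a b := by
  intro bw dp a b ha hb hbw hdp
  by_cases h11 : a = 1 ∧ b = 1
  · unfold stepA
    rw [if_pos h11]
    obtain ⟨rfl, rfl⟩ := h11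
    exact (hdp 1 1).1 ⟨le_refl 1, le_refl 1, Or.inr (Or.inr ⟨rfl, rfl⟩)⟩
  · have hdpab : dp.getD (a, b) 0 = 0 :=
      (hdp a b).2 (by rintro ⟨_, _, hr⟩; unfold Reg at hr; omega)
    have hprev : 1 < a → dp.getD (a - 1, b) 0 = pf (a - 1) b := fun hA =>
      (hdp (a - 1) b).1 ⟨by omega, hb, Or.inl ⟨by omega, hbw⟩⟩
    have hleft : 1 < b → dp.getD (a, b - 1) 0 = pf a (b - 1) := fun hB =>
      (hdp a (b - 1)).1 ⟨ha, by omega, Or.inr (Or.inl ⟨rfl, by omega⟩)⟩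
    have hbne : ((a, b - 1) : Int × Int) ≠ (a, b) := by simp [Prod.ext_iff]
    unfold stepA
    rw [if_neg h11, pf, dif_pos ⟨ha, hb⟩, if_neg h11]
    by_cases hA : 1 < a <;> by_cases hB : 1 < b
    · simp [hA, hB, PySem.Dict.getD_insert, hbne, hdpab, hprev hA, hleft hB]
    · simp [hA, hB, PySem.Dict.getD_insert, hdpab, hprev hA]
    · simp [hA, hB, PySem.Dict.getD_insert, hbne, hdpab, hleft hB]
    · omega

theorem init_table : Tbl (Reg 0 1 1) (PySem.Dict.empty.insert ((1 : Int), (1 : Int)) 1) := by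
  intro x y
  constructor
  · rintro ⟨hx, hy, hr⟩
    unfold Reg at hr
    have h : x = 1 ∧ y = 1 := by omega
    obtain ⟨rfl, rfl⟩ := h
    simp [PySem.Dict.getD_insert, pf_base]
  · intro hn
    have hne : ((x, y) : Int × Int) ≠ (1, 1) := by
      rintro h
      simp only [Prod.mk.injEq] at h
      exact hn ⟨by omega, by omega, Or.inr (Or.inr ⟨h.1, h.2⟩)⟩
    simp [PySem.Dict.getD_insert, hne]

theorem calc_prob_eq_pf (aw bw : Int) (ha : 1 ≤ aw) (hb : 1 ≤ bw) :
    calc_prob aw bw = pf aw bw := by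
  have h0 : Tbl (Reg bw 1 1) (PySem.Dict.empty.insert ((1 : Int), (1 : Int)) 1) :=
    Tbl_congr (fun x y hx hy => by unfold Reg; omega) init_table
  have hfin := outer_general stepA stepA_frame stepA_correct bw aw (by omega) 1 _
    (le_refl 1) (by omega) h0
  have hport : calc_prob aw bw =
      ((PySem.List.pyRange 1 (aw + 1) 1).foldl (fun dp a =>
        (PySem.List.pyRange 1 (bw + 1) 1).foldl (fun dp b => stepA dp a b) dp)
        (PySem.Dict.empty.insert ((1 : Int), (1 : Int)) 1)).getD (aw, bw) 0 := rfl
  rw [hport]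
  exact (hfin aw bw).1 ⟨ha, hb, Or.inl ⟨by omega, le_refl bw⟩⟩

theorem pv_cast_emod (a : Int) :
    ((a % (1000000007 : ℤ) : ℤ) : ZMod 1000000007) = (a : ZMod 1000000007) := by
  exact_mod_cast ZMod.intCast_mod a 1000000007

theorem pv_emod_eq {x y : Int} (h : ((x : ℤ) : ZMod 1000000007) = (y : ZMod 1000000007)) :
    x % M = y % M := by
  unfold M
  rw [show (1000000007 : ℤ) = ((1000000007 : ℕ) : ℤ) by norm_cast]
  exact (ZMod.intCast_eq_intCast_iff _ _ 1000000007).mp h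

theorem powmod_eq (b : Int) (e : Nat) : powmod b e M = b ^ e % M := by
  induction e using Nat.strong_induction_on with
  | _ e ih =>
    rw [powmod]
    by_cases h0 : e = 0
    · subst h0; norm_num
    · rw [if_neg h0]
      have ih2 := ih (e / 2) (by omega)
      simp only [ih2]
      by_cases h1 : e % 2 = 1
      · rw [if_pos h1]
        rw [show b ^ e = b ^ (e / 2) * b ^ (e / 2) * b by
          rw [← pow_add, ← pow_succ]; congr 1; omega]
        exact pv_emod_eq (by push_cast [pv_cast_emod, show M = (1000000007 : ℤ) from rfl]; ring)
      · rw [if_neg h1]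
        rw [show b ^ e = b ^ (e / 2) * b ^ (e / 2) by rw [← pow_add]; congr 1; omega]
        exact pv_emod_eq (by push_cast [pv_cast_emod, show M = (1000000007 : ℤ) from rfl]; ring)

theorem bridge (v u c d : Int) :
    mod_add v (mod_multiply u (mod_divide c d)) =
      (v + u * c % M * powmod d (M - 2).toNat M) % M := by
  have hnorm : ∀ x : Int, (x % M + M) % M = x % M := by intro x; unfold M; omega
  simp only [mod_add, mod_multiply, mod_divide, hnorm, powmod_eq]
  show Int.ModEq M _ _
  unfold M
  rw [show (1000000007 : ℤ) = ((1000000007 : ℕ) : ℤ) by norm_cast,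
    ← ZMod.intCast_eq_intCast_iff]
  have hc : ∀ a : Int, ((a % (1000000007 : ℤ) : ℤ) : ZMod 1000000007) = (a : ZMod 1000000007) :=
    fun a => by exact_mod_cast ZMod.intCast_mod a 1000000007
  push_cast [hc]
  ring

def stepB (dp : PySem.Dict (Int × Int) Int) (a b : Int) : PySem.Dict (Int × Int) Int :=
  if a = 1 ∧ b = 1 then dp
  else
    let v : Int := 0
    let v := if 1 < a then
        (v + dp.getD (a - 1, b) 0 * b % M * powmod (a + b - 1) (M - 2).toNat M) % M
      else v
    let v := if 1 < b then
        (v + dp.getD (a, b - 1) 0 * a % M * powmod (a + b - 1) (M - 2).toNat M) % M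
      else v
    dp.insert (a, b) v

theorem stepB_frame : ∀ dp a b x y, ¬(x = a ∧ y = b) →
    (stepB dp a b).getD (x, y) 0 = dp.getD (x, y) 0 := by
  intro dp a b x y hxy
  have hne : ((x, y) : Int × Int) ≠ (a, b) := by simp [Prod.ext_iff]; omega
  unfold stepB
  split_ifs <;> simp_all [PySem.Dict.getD_insert]

theorem stepB_correct : ∀ (bw : Int) dp a b, 1 ≤ a → 1 ≤ b → b ≤ bw → Tbl (Reg bw a b) dp →
    (stepB dp a b).getD (a, b) 0 = pf a b := by
  intro bw dp a b ha hb hbw hdp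
  by_cases h11 : a = 1 ∧ b = 1
  · unfold stepB
    rw [if_pos h11]
    obtain ⟨rfl, rfl⟩ := h11
    exact (hdp 1 1).1 ⟨le_refl 1, le_refl 1, Or.inr (Or.inr ⟨rfl, rfl⟩)⟩
  · have hprev : 1 < a → dp.getD (a - 1, b) 0 = pf (a - 1) b := fun hA =>
      (hdp (a - 1) b).1 ⟨by omega, hb, Or.inl ⟨by omega, hbw⟩⟩
    have hleft : 1 < b → dp.getD (a, b - 1) 0 = pf a (b - 1) := fun hB =>
      (hdp a (b - 1)).1 ⟨ha, by omega, Or.inr (Or.inl ⟨rfl, by omega⟩)⟩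
    have hbne : ((a, b - 1) : Int × Int) ≠ (a, b) := by simp [Prod.ext_iff]
    unfold stepB
    rw [if_neg h11, pf, dif_pos ⟨ha, hb⟩, if_neg h11]
    by_cases hA : 1 < a <;> by_cases hB : 1 < b
    · simp [hA, hB, PySem.Dict.getD_insert, hbne, hprev hA, hleft hB, bridge]
    · simp [hA, hB, PySem.Dict.getD_insert, hprev hA, bridge]
    · simp [hA, hB, PySem.Dict.getD_insert, hleft hB, bridge]
    · omega

theorem mod_multiply_eq (x y : Int) : mod_multiply x y = x * y % M := by
  have hnorm : ∀ x : Int, (x % M + M) % M = x % M := by intro x; unfold M; omega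
  simp only [mod_multiply, hnorm]
  exact pv_emod_eq (by push_cast [pv_cast_emod, show M = (1000000007:ℤ) from rfl]; ring)

theorem bridge_sq (v i p : Int) :
    mod_add v (mod_multiply (mod_multiply i i) p) = (v + i * i * p) % M := by
  have hnorm : ∀ x : Int, (x % M + M) % M = x % M := by intro x; unfold M; omega
  simp only [mod_add, mod_multiply, hnorm]
  exact pv_emod_eq (by push_cast [pv_cast_emod, show M = (1000000007:ℤ) from rfl]; ring)

theorem bridge_lin (v i p : Int) :
    mod_add v (mod_multiply i p) = (v + i * p) % M := by
  have hnorm : ∀ x : Int, (x % M + M) % M = x % M := by intro x; unfold M; omega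
  simp only [mod_add, mod_multiply, hnorm]
  exact pv_emod_eq (by push_cast [pv_cast_emod, show M = (1000000007:ℤ) from rfl]; ring)

-- the probability at diagonal point i (a + b = t)
def diag (t i : Int) : Int :=
  pf (PySem.Int.floordiv (t + i) 2) (PySem.Int.floordiv (t - i) 2)

def S2 (t : Int) : Int :=
  (PySem.List.pyRange (-t + 2) (t - 1) 1).foldl
    (fun acc i => if (t + i) % 2 = 0 then (acc + i * i * diag t i) % M else acc) 0

def S1 (t : Int) : Int :=
  (PySem.List.pyRange (-t + 2) (t - 1) 1).foldl
    (fun acc i => if (t + i) % 2 = 0 then (acc + i * diag t i) % M else acc) 0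

theorem fd_bounds {t i : Int} (h1 : -t + 2 ≤ i) (h2 : i < t - 1) :
    1 ≤ PySem.Int.floordiv (t + i) 2 ∧ PySem.Int.floordiv (t + i) 2 ≤ t - 1 ∧
    1 ≤ PySem.Int.floordiv (t - i) 2 ∧ PySem.Int.floordiv (t - i) 2 ≤ t - 1 := by
  rw [PySem.Int.floordiv_eq_ediv_of_pos (by omega), PySem.Int.floordiv_eq_ediv_of_pos (by omega)]
  omega

theorem A_eq (t : Int) : calc_variance t = S2 t - S1 t * S1 t % M := by
  unfold calc_variance calc_expectation
  have hans : (PySem.List.pyRange (-t + 2) (t - 1) 1).foldl (fun ans i =>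
      if (t + i) % 2 = 0 then
        mod_add ans (mod_multiply (mod_multiply i i)
          (calc_prob (PySem.Int.floordiv (t + i) 2) (PySem.Int.floordiv (t - i) 2)))
      else ans) 0 = S2 t := by
    unfold S2
    refine PySem.List.foldl_congr_mem _ _ _ _ ?_
    intro acc i hi
    rw [PySem.List.mem_pyRange_one] at hi
    obtain ⟨hb1, hb2, hb3, hb4⟩ := fd_bounds hi.1 hi.2
    rw [calc_prob_eq_pf _ _ hb1 hb3, bridge_sq]
    rfl
  have hy : (PySem.List.pyRange (-t + 2) (t - 1) 1).foldl (fun ans i =>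
      if (t + i) % 2 = 0 then
        mod_add ans (mod_multiply i
          (calc_prob (PySem.Int.floordiv (t + i) 2) (PySem.Int.floordiv (t - i) 2)))
      else ans) 0 = S1 t := by
    unfold S1
    refine PySem.List.foldl_congr_mem _ _ _ _ ?_
    intro acc i hi
    rw [PySem.List.mem_pyRange_one] at hi
    obtain ⟨hb1, hb2, hb3, hb4⟩ := fd_bounds hi.1 hi.2
    rw [calc_prob_eq_pf _ _ hb1 hb3, bridge_lin]
    rfl
  rw [hans, hy]
  simp only [mod_multiply_eq]

theorem pair_eq (t : Int) (dpf : PySem.Dict (Int × Int) Int)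
    (hdp : ∀ x y, 1 ≤ x → 1 ≤ y → x ≤ t - 1 → y ≤ t - 1 → dpf.getD (x, y) 0 = pf x y) :
    ((PySem.List.pyRange (-t + 2) (t - 1) 1).foldl (fun s i =>
        if (t + i) % 2 = 0 then
          ((s.1 + i * i * dpf.getD (PySem.Int.floordiv (t + i) 2, PySem.Int.floordiv (t - i) 2) 0) % M,
           (s.2 + i * dpf.getD (PySem.Int.floordiv (t + i) 2, PySem.Int.floordiv (t - i) 2) 0) % M)
        else s) ((0 : Int), (0 : Int))).1 -
      ((PySem.List.pyRange (-t + 2) (t - 1) 1).foldl (fun s i =>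
        if (t + i) % 2 = 0 then
          ((s.1 + i * i * dpf.getD (PySem.Int.floordiv (t + i) 2, PySem.Int.floordiv (t - i) 2) 0) % M,
           (s.2 + i * dpf.getD (PySem.Int.floordiv (t + i) 2, PySem.Int.floordiv (t - i) 2) 0) % M)
        else s) ((0 : Int), (0 : Int))).2 *
      ((PySem.List.pyRange (-t + 2) (t - 1) 1).foldl (fun s i =>
        if (t + i) % 2 = 0 then
          ((s.1 + i * i * dpf.getD (PySem.Int.floordiv (t + i) 2, PySem.Int.floordiv (t - i) 2) 0) % M,
           (s.2 + i * dpf.getD (PySem.Int.floordiv (t + i) 2, PySem.Int.floordiv (t - i) 2) 0) % M)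
        else s) ((0 : Int), (0 : Int))).2 % M
      = S2 t - S1 t * S1 t % M := by
  have hcongr : (PySem.List.pyRange (-t + 2) (t - 1) 1).foldl (fun s i =>
        if (t + i) % 2 = 0 then
          ((s.1 + i * i * dpf.getD (PySem.Int.floordiv (t + i) 2, PySem.Int.floordiv (t - i) 2) 0) % M,
           (s.2 + i * dpf.getD (PySem.Int.floordiv (t + i) 2, PySem.Int.floordiv (t - i) 2) 0) % M)
        else s) ((0 : Int), (0 : Int)) =
      (PySem.List.pyRange (-t + 2) (t - 1) 1).foldl (fun s i =>
        ((fun acc i => if (t + i) % 2 = 0 then (acc + i * i * diag t i) % M else acc) s.1 i,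
         (fun acc i => if (t + i) % 2 = 0 then (acc + i * diag t i) % M else acc) s.2 i))
        ((0 : Int), (0 : Int)) := by
    refine PySem.List.foldl_congr_mem _ _ _ _ ?_
    intro acc i hi
    rw [PySem.List.mem_pyRange_one] at hi
    obtain ⟨hb1, hb2, hb3, hb4⟩ := fd_bounds hi.1 hi.2
    simp only [diag, hdp _ _ hb1 hb3 hb2 hb4]
    split_ifs <;> rfl
  rw [hcongr, PySem.List.foldl_prod_mk
    (f := fun acc i => if (t + i) % 2 = 0 then (acc + i * i * diag t i) % M else acc)
    (g := fun acc i => if (t + i) % 2 = 0 then (acc + i * diag t i) % M else acc)]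
  unfold S2 S1
  rfl

theorem B_eq (t : Int) (ht : 2 ≤ t) : calc_variance_alt t = S2 t - S1 t * S1 t % M := by
  have h0 : Tbl (Reg (t - 1) 1 1) (PySem.Dict.empty.insert ((1 : Int), (1 : Int)) 1) :=
    Tbl_congr (fun x y hx hy => by unfold Reg; omega) init_table
  have hout := outer_general stepB stepB_frame stepB_correct (t - 1) (t - 1) (by omega) 1 _
    (le_refl 1) (by omega) h0
  have hdp : ∀ x y, 1 ≤ x → 1 ≤ y → x ≤ t - 1 → y ≤ t - 1 →
      ((PySem.List.pyRange 1 (t - 1 + 1) 1).foldl (fun dp a =>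
        (PySem.List.pyRange 1 (t - 1 + 1) 1).foldl (fun dp b => stepB dp a b) dp)
        (PySem.Dict.empty.insert ((1 : Int), (1 : Int)) 1)).getD (x, y) 0 = pf x y := by
    intro x y hx hy hx2 hy2
    exact (hout x y).1 ⟨hx, hy, Or.inl ⟨by omega, hy2⟩⟩
  unfold calc_variance_alt
  rw [if_neg (by omega : ¬ t < 2)]
  exact pair_eq t _ hdp

theorem main_eq (t : Int) : calc_variance t = calc_variance_alt t := by
  by_cases ht : t < 2
  · have hnil : PySem.List.pyRange (-t + 2) (t - 1) 1 = [] :=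
      PySem.List.pyRange_one_eq_nil (by omega)
    unfold calc_variance calc_expectation calc_variance_alt
    rw [hnil, if_pos ht]
    simp [mod_multiply_eq, M]
  · rw [A_eq t, B_eq t (by omega)]

-- ===== VERDICT (by name: the statement is the Claim_ definition above) =====
theorem calc_variance_spec : Claim_equal_calc_variance := by
  intro t _
  exact main_eq t
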